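-- pv_equiv track=rewrite | github.com/daryaanbar/LaptopShopper | web_scraper.py | get_key_specs
-- ===== SOURCE A (Python) =====
-- from typing import List, Dict
--
-- def get_key_specs(specs: Dict) -> Dict:
--     #extracting key specifications
--     key_specs ={
--         'Performance': [],
--         'Display': [],
--         'Storage': [],
--         'Other': []
--     }
--     for key, value in specs.items():
--         if any(term in key.lower() for term in ['processor', 'cpu', 'graphics', 'gpu']):
--             key_specs['Performance'].append(f"{key}: {value}")
--         elif any(term in key.lower() for term in ['display', 'screen']):
--             key_specs['Display'].append(f"{key}: {value}")
--         elif any(term in key.lower() for term in ['storage', 'ram', 'memory']):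
--             key_specs['Storage'].append(f"{key}: {value}")
--         else:
--             key_specs['Other'].append(f"{key}: {value}")
--     return key_specs
-- ===== SOURCE B (Python) =====
-- _TABLE = [
--     ('Performance', ('processor', 'cpu', 'graphics', 'gpu')),
--     ('Display', ('display', 'screen')),
--     ('Storage', ('storage', 'ram', 'memory')),
-- ]
--
--
-- def _category(key):
--     kl = key.lower()
--     return next((name for name, terms in _TABLE if any(t in kl for t in terms)), 'Other')
--
--
-- def get_key_specs(specs):
--     tagged = [(_category(k), f"{k}: {v}") for k, v in specs.items()]
--     return {name: [line for c, line in tagged if c == name]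
--             for name in ('Performance', 'Display', 'Storage', 'Other')}
-- ===== Notes on version B (the rewrite author's own statement) =====
-- stated objective: simpler
-- what changed: Replaces the if/elif chain that appends into four mutable buckets with a map-then-group scheme: a table-driven _category function tags each item in one comprehension, and the result dict is built by a comprehension that filters the tagged list per category.
import Mathlib
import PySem

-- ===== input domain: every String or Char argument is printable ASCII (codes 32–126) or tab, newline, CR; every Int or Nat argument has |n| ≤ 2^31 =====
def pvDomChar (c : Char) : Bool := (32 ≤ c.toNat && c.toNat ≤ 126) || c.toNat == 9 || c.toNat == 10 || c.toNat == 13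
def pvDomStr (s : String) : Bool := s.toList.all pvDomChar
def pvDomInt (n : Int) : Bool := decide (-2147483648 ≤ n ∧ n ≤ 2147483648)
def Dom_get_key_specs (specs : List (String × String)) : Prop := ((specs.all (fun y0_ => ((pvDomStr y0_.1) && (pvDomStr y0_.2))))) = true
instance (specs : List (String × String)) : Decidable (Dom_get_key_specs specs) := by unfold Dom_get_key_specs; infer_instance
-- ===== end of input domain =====

-- B replaces A's if/elif chain appending into four mutable buckets by tagging each item with
-- its category from a priority table and building each bucket as a filter of the tagged list (simpler decomposition).


-- ===== PORT A =====
-- the f-string f"{key}: {value}"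
def pvLineA (k v : String) : String := k ++ ": " ++ v

-- one step of A's for-loop over specs.items(): the if/elif chain appending to one of the four buckets
def pvStepA (st : List String × List String × List String × List String) (kv : String × String) :
    List String × List String × List String × List String :=
  let kl := PySem.Str.lower kv.1
  let line := pvLineA kv.1 kv.2
  if ["processor", "cpu", "graphics", "gpu"].any (fun t => PySem.Str.isIn t kl) then
    (st.1 ++ [line], st.2.1, st.2.2.1, st.2.2.2)
  else if ["display", "screen"].any (fun t => PySem.Str.isIn t kl) then
    (st.1, st.2.1 ++ [line], st.2.2.1, st.2.2.2)
  else if ["storage", "ram", "memory"].any (fun t => PySem.Str.isIn t kl) then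
    (st.1, st.2.1, st.2.2.1 ++ [line], st.2.2.2)
  else
    (st.1, st.2.1, st.2.2.1, st.2.2.2 ++ [line])

def get_key_specs (specs : List (String × String)) : List (String × List String) :=
  -- 'specs' is a Python dict: iteration is over its items (first key position, last value)
  let items := (PySem.Dict.ofList specs).items
  let st := items.foldl pvStepA ([], [], [], [])
  [("Performance", st.1), ("Display", st.2.1), ("Storage", st.2.2.1), ("Other", st.2.2.2)]

-- ===== PORT B =====
def pvTable : List (String × List String) :=
  [("Performance", ["processor", "cpu", "graphics", "gpu"]),
   ("Display", ["display", "screen"]),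
   ("Storage", ["storage", "ram", "memory"])]

-- _category: first table row one of whose terms occurs in key.lower(), else 'Other'
def pvCategory (key : String) : String :=
  let kl := PySem.Str.lower key
  match pvTable.find? (fun nt => nt.2.any (fun t => PySem.Str.isIn t kl)) with
  | some nt => nt.1
  | none => "Other"

def get_key_specs_alt (specs : List (String × String)) : List (String × List String) :=
  let items := (PySem.Dict.ofList specs).items
  let tagged := items.map (fun kv => (pvCategory kv.1, pvLineA kv.1 kv.2))
  ["Performance", "Display", "Storage", "Other"].map
    (fun n => (n, (tagged.filter (fun cl => cl.1 == n)).map (·.2)))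

-- ===== PRECONDITION & SPEC =====
def Spec_get_key_specs (specs : List (String × String)) (out : List (String × List String)) : Prop := out = get_key_specs_alt specs
instance (specs : List (String × String)) (out : List (String × List String)) : Decidable (Spec_get_key_specs specs out) := by unfold Spec_get_key_specs; infer_instance

-- ===== CLAIM (what is proved, stated in full; the proofs are below) =====
def Claim_equal_get_key_specs : Prop := ∀ (specs : List (String × String)), Dom_get_key_specs specs → Spec_get_key_specs specs (get_key_specs specs)

-- ===== LEMMAS AND PROOFS =====

-- one bucket of B, as a function of the item list
def pvBucket (items : List (String × String)) (n : String) : List String :=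
  ((items.map (fun kv => (pvCategory kv.1, pvLineA kv.1 kv.2))).filter
     (fun cl => cl.1 == n)).map (·.2)

theorem pvFold_eq (items : List (String × String))
    (p d s o : List String) :
    items.foldl pvStepA (p, d, s, o) =
      (p ++ pvBucket items "Performance", d ++ pvBucket items "Display",
       s ++ pvBucket items "Storage", o ++ pvBucket items "Other") := by
  induction items generalizing p d s o with
  | nil => simp [pvBucket]
  | cons kv rest ih =>
    obtain ⟨k, v⟩ := kv
    by_cases h1 : ["processor", "cpu", "graphics", "gpu"].any
        (fun t => PySem.Str.isIn t (PySem.Str.lower k)) = true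
    · simp only [List.foldl_cons, pvStepA, h1, if_true, ih, pvBucket, List.map_cons,
        List.filter_cons, pvCategory, pvTable, List.find?, h1]
      simp
    · by_cases h2 : ["display", "screen"].any
          (fun t => PySem.Str.isIn t (PySem.Str.lower k)) = true
      · simp only [List.foldl_cons, pvStepA, h1, h2, if_true, if_false, ih, pvBucket,
          List.map_cons, List.filter_cons, pvCategory, pvTable, List.find?, h1, h2]
        simp
      · by_cases h3 : ["storage", "ram", "memory"].any
            (fun t => PySem.Str.isIn t (PySem.Str.lower k)) = true
        · simp only [List.foldl_cons, pvStepA, h1, h2, h3, if_true, if_false, ih, pvBucket,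
            List.map_cons, List.filter_cons, pvCategory, pvTable, List.find?, h1, h2, h3]
          simp
        · simp only [List.foldl_cons, pvStepA, h1, h2, h3, if_false, ih, pvBucket,
            List.map_cons, List.filter_cons, pvCategory, pvTable, List.find?, h1, h2, h3]
          simp

-- ===== VERDICT (by name: the statement is the Claim_ definition above) =====
theorem get_key_specs_spec : Claim_equal_get_key_specs := by
  intro specs _
  unfold Spec_get_key_specs get_key_specs get_key_specs_alt
  simp only [pvFold_eq, List.nil_append, List.map_cons, List.map_nil]
  rfl
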